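-- pv_equiv track=rewrite | github.com/Ameliyn/skye-Portfolio | AI-Machine-Learning/PythonExcercises/LubanovicExcercises/lub9.py | repeated_values
-- ===== SOURCE A (Python) =====
-- def repeated_values(param: dict):
--     temp = []
--     for i in param.values():
--         if i in temp:
--             return True
--         else:
--             temp.append(i)
--     return False
-- ===== SOURCE B (Python) =====
-- def repeated_values(param: dict):
--     vals = list(param.values())
--     return len(set(vals)) != len(vals)
-- ===== Notes on version B (the rewrite author's own statement) =====
-- stated objective: simpler
-- what changed: Replaces the incremental seen-so-far list scan with early return by a single cardinality comparison: deduplicate all values via a set and compare counts.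
import Mathlib
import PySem

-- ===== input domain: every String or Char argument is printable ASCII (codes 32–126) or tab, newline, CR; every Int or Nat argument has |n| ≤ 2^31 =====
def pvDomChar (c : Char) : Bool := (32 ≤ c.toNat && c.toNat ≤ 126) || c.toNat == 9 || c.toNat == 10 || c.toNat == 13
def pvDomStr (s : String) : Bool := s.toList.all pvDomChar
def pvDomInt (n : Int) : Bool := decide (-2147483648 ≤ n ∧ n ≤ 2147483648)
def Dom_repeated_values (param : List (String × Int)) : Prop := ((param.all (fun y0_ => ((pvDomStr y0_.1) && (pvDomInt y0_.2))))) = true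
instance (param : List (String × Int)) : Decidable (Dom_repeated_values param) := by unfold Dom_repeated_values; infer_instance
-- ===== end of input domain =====

-- B replaces A's incremental seen-so-far scan (with early return) by one cardinality
-- comparison: deduplicate all values and compare counts (objective: simpler).


-- ===== PORT A =====
-- 'for i in param.values(): if i in temp: return True; else temp.append(i)'
def repeatedValuesLoop : List Int → List Int → Bool
  | [], _ => false
  | i :: rest, temp => if i ∈ temp then true else repeatedValuesLoop rest (temp ++ [i])

def repeated_values (param : List (String × Int)) : Bool :=
  repeatedValuesLoop ((PySem.Dict.mk param).values) []

-- ===== PORT B =====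
-- vals = list(param.values()); return len(set(vals)) != len(vals)
def repeated_values_alt (param : List (String × Int)) : Bool :=
  let vals := (PySem.Dict.mk param).values
  decide ((PySem.Set.ofList vals).length ≠ vals.length)

-- ===== PRECONDITION & SPEC =====
def Spec_repeated_values (param : List (String × Int)) (out : Bool) : Prop := out = repeated_values_alt param
instance (param : List (String × Int)) (out : Bool) : Decidable (Spec_repeated_values param out) := by unfold Spec_repeated_values; infer_instance

-- ===== CLAIM (what is proved, stated in full; the proofs are below) =====
def Claim_equal_repeated_values : Prop := ∀ (param : List (String × Int)), Dom_repeated_values param → Spec_repeated_values param (repeated_values param)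

-- ===== LEMMAS AND PROOFS =====

-- A's loop with a duplicate-free accumulator decides 'temp ++ vs has a duplicate'.
theorem repeatedValuesLoop_eq (vs : List Int) :
    ∀ temp : List Int, temp.Nodup →
      repeatedValuesLoop vs temp = !decide ((temp ++ vs).Nodup) := by
  induction vs with
  | nil => intro temp h; simp [repeatedValuesLoop, h]
  | cons i rest ih =>
    intro temp h
    by_cases hi : i ∈ temp
    · have : ¬ (temp ++ i :: rest).Nodup := by
        intro hnd
        have := List.disjoint_of_nodup_append hnd
        exact this hi List.mem_cons_self
      simp [repeatedValuesLoop, hi, this]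
    · have h' : (temp ++ [i]).Nodup := by
        simp [List.nodup_append, h]
        intro a ha
        rintro rfl
        exact hi ha
      have := ih (temp ++ [i]) h'
      simp only [repeatedValuesLoop, hi, if_false, this, List.append_assoc,
        List.singleton_append]

-- len(set(vs)) = len(vs) exactly when vs has no duplicates.
theorem length_ofList_eq_iff (l : List Int) :
    (PySem.Set.ofList l).length = l.length ↔ l.Nodup := by
  constructor
  · intro h
    by_contra hnd
    -- show length ofList < length when not Nodup
    have : (PySem.Set.ofList l).length < l.length := by
      clear h
      induction l with
      | nil => simp at hnd
      | cons x xs ih =>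
        rw [PySem.Set.ofList_cons]
        simp only [List.length_cons]
        rw [List.nodup_cons, not_and_or] at hnd
        have hdle : (PySem.Set.discard (PySem.Set.ofList xs) x).length ≤
            (PySem.Set.ofList xs).length := by
          unfold PySem.Set.discard
          exact List.length_filter_le _ _
        rcases hnd with hmem | hnd
        · have hx : x ∈ PySem.Set.ofList xs :=
            (PySem.Set.mem_ofList _ _).2 (not_not.mp hmem)
          have hlt : (PySem.Set.discard (PySem.Set.ofList xs) x).length <
              (PySem.Set.ofList xs).length := by
            unfold PySem.Set.discard
            apply List.length_filter_lt_length_iff_exists.2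
            exact ⟨x, hx, by simp⟩
          have := PySem.Set.length_ofList_le (xs := xs)
          omega
        · have := ih hnd
          omega
    omega
  · intro h
    rw [PySem.Set.ofList_eq_self_of_nodup _ h]

-- ===== VERDICT (by name: the statement is the Claim_ definition above) =====
theorem repeated_values_spec : Claim_equal_repeated_values := by
  intro param _
  unfold Spec_repeated_values repeated_values repeated_values_alt
  rw [repeatedValuesLoop_eq _ [] List.nodup_nil, List.nil_append]
  have h := length_ofList_eq_iff ((PySem.Dict.mk param).values)
  by_cases hn : ((PySem.Dict.mk param).values).Nodup
  · simp only [hn, decide_true, Bool.not_true, h.2 hn, ne_eq, not_true_eq_false,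
      decide_false]
  · simp only [hn, decide_false, Bool.not_false]
    symm
    rw [decide_eq_true_iff]
    exact fun hc => hn (h.1 hc)
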